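-- pv_equiv track=rewrite | github.com/Z3N00/DS-Algo | 9. Dynamic Programming/tilingmx1.py | No_of_ways
-- ===== SOURCE A (Python) =====
-- def No_of_ways(n , m):
--     #Write your code here
--     dp = [0 for i in range(n+1)]
--     for i in range(1, n+1):
--         if(i<m):
--             dp[i] = 1
--         elif(i==m):
--             dp[i] = 2
--         else:
--             dp[i] = dp[i-1] + dp[i-m]
--
--
--     return dp[n]
-- ===== SOURCE B (Python) =====
-- def No_of_ways(n, m):
--     # Closed form: tilings of n with pieces of width 1 and m = compositions of n
--     # into parts {1, m}: sum over k (number of m-tiles) of C(n - k*(m-1), k),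
--     # each term obtained from the previous one by an exact ratio update.
--     total = 1
--     term = 1
--     for k in range(n // m):
--         a = n - k * (m - 1)
--         num = 1
--         for j in range(m):
--             num *= a - k - j
--         den = k + 1
--         for j in range(m - 1):
--             den *= a - j
--         term = term * num // den
--         total += term
--     return total
-- ===== Notes on version B (the rewrite author's own statement) =====
-- stated objective: alternative
-- what changed: Replaces the O(n) dp-array recurrence dp[i]=dp[i-1]+dp[i-m] by the closed-form binomial sum over the number k of m-tiles, sum_{k=0}^{n//m} C(n-k*(m-1), k), with each term obtained from the previous one by an exact integer ratio update.
-- intended difference: For n = 0 (with m >= 1) A returns 0 because it initialises dp[0]=0, while B returns 1, the number of tilings of an empty strip (the value the recurrence itself assumes, since A hardcodes dp[m]=2=dp[m-1]+1); B's is the intended count. — e.g. on No_of_ways(0, 1): A returns 0, B returns 1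
-- outside the precondition, e.g. on No_of_ways(3, 0): A returns 0, B raises ZeroDivisionError; on No_of_ways(0, -2): A returns 0, B returns 1
import Mathlib
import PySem

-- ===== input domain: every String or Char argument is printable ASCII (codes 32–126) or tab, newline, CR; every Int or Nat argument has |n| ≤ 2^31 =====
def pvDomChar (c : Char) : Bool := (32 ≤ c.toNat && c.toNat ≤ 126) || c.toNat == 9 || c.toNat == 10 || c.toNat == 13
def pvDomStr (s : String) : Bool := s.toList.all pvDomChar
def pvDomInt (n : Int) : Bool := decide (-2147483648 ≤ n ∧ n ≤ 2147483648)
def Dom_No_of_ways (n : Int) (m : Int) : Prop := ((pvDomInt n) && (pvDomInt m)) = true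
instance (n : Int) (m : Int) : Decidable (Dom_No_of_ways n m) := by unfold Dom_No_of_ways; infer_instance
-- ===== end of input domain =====

-- B replaces A's O(n) dp-array recurrence by the closed-form binomial sum over the
-- number k of m-tiles, sum_{k=0}^{n//m} C(n-k*(m-1), k), each binomial computed incrementally.

-- ===== PORT A =====
def No_of_ways (n : Int) (m : Int) : Int :=
  let dp : List Int := (PySem.List.pyRange 0 (n + 1) 1).map (fun _ => (0 : Int))
  let dp := (PySem.List.pyRange 1 (n + 1) 1).foldl (fun dp i =>
    if i < m then PySem.List.pySetD dp i 1
    else if i = m then PySem.List.pySetD dp i 2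
    else PySem.List.pySetD dp i
      (PySem.List.pyGetD dp (i - 1) 0 + PySem.List.pyGetD dp (i - m) 0)) dp
  PySem.List.pyGetD dp n 0

-- ===== PORT B =====
def No_of_ways_alt (n : Int) (m : Int) : Int :=
  let r := (PySem.List.pyRange 0 (PySem.Int.floordiv n m) 1).foldl (fun (s : Int × Int) k =>
    let a := n - k * (m - 1)
    let num := (PySem.List.pyRange 0 m 1).foldl (fun num j => num * (a - k - j)) 1
    let den := (PySem.List.pyRange 0 (m - 1) 1).foldl (fun den j => den * (a - j)) (k + 1)
    let term := PySem.Int.floordiv (s.2 * num) den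
    (s.1 + term, term)) (1, 1)
  r.1

-- ===== PRECONDITION & SPEC =====
-- Pre_ excludes n < 0 (A raises IndexError on dp[n]), m < 0 with n ≥ 1 (A raises
-- IndexError on dp[i-m]), and m = 0 / (n = 0 with m ≤ 0), where B's range(n//m+1)
-- raises ZeroDivisionError (resp. the width-0/negative tile makes A's 0 meaningless).
def Pre_No_of_ways (n : Int) (m : Int) : Prop := 0 ≤ n ∧ 1 ≤ m
instance (n : Int) (m : Int) : Decidable (Pre_No_of_ways n m) := by unfold Pre_No_of_ways; infer_instance

def pvWitness_No_of_ways : Int × Int := (4, 2)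

-- For n = 0 (with m ≥ 1) A returns 0 because it initialises dp[0]=0, while B returns 1,
-- the number of tilings of an empty strip — the value A's own recurrence assumes
-- (it hardcodes dp[m] = 2 = dp[m-1] + 1); B's is the intended count.
def D_No_of_ways (n : Int) (m : Int) : Prop := n = 0
instance (n : Int) (m : Int) : Decidable (D_No_of_ways n m) := by unfold D_No_of_ways; infer_instance

def Spec_No_of_ways (n : Int) (m : Int) (out : Int) : Prop := ¬ D_No_of_ways n m → out = No_of_ways_alt n m
instance (n : Int) (m : Int) (out : Int) : Decidable (Spec_No_of_ways n m out) := by unfold Spec_No_of_ways; infer_instance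

def pvDiffWitness_No_of_ways : Int × Int := (0, 1)
def pvDiffWitnessOut_No_of_ways : Int × Int := (0, 1)

-- ===== CLAIM (what is proved, stated in full; the proofs are below) =====
def Claim_unchanged_No_of_ways : Prop := ∀ (n : Int) (m : Int), Dom_No_of_ways n m → Pre_No_of_ways n m → Spec_No_of_ways n m (No_of_ways n m)
def Claim_changed_No_of_ways : Prop := Dom_No_of_ways (pvDiffWitness_No_of_ways.1) (pvDiffWitness_No_of_ways.2) ∧ Pre_No_of_ways (pvDiffWitness_No_of_ways.1) (pvDiffWitness_No_of_ways.2) ∧ D_No_of_ways (pvDiffWitness_No_of_ways.1) (pvDiffWitness_No_of_ways.2) ∧ No_of_ways (pvDiffWitness_No_of_ways.1) (pvDiffWitness_No_of_ways.2) = pvDiffWitnessOut_No_of_ways.1 ∧ No_of_ways_alt (pvDiffWitness_No_of_ways.1) (pvDiffWitness_No_of_ways.2) = pvDiffWitnessOut_No_of_ways.2 ∧ pvDiffWitnessOut_No_of_ways.1 ≠ pvDiffWitnessOut_No_of_ways.2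
def Claim_exact_No_of_ways : Prop := ∀ (n : Int) (m : Int), Dom_No_of_ways n m → Pre_No_of_ways n m → D_No_of_ways n m → No_of_ways n m ≠ No_of_ways_alt n m

-- ===== LEMMAS AND PROOFS =====

-- The recurrence both programs compute (tile width m = m'+1): F(i)=1 for i<m, 2 for i=m,
-- F(i-1)+F(i-m) above; F(0)=1 is the value the recurrence itself assumes at dp[m]=2.
def F (m' : Nat) (i : Nat) : Nat :=
  if h1 : i < m' + 1 then 1
  else if h2 : i = m' + 1 then 2
  else F m' (i - 1) + F m' (i - (m' + 1))
termination_by i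
decreasing_by all_goals omega

-- The closed form: number of compositions of i into parts {1, m'+1}.
def TT (m' : Nat) (i : Nat) : Nat :=
  ((List.range (i + 1)).map (fun k => (i - k * m').choose k)).sum

lemma choose_term_zero (m' i k : Nat) (h : i < k * (m' + 1)) : (i - k * m').choose k = 0 := by
  rcases k with _ | k
  · simp at h
  · rw [Nat.mul_succ] at h
    exact Nat.choose_eq_zero_of_lt (by omega)

lemma TT_lt (m' i : Nat) (h : i < m' + 1) : TT m' i = 1 := by
  unfold TT
  rw [List.range_succ_eq_map, List.map_cons, List.map_map, List.sum_cons]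
  have hz : ∀ x ∈ (List.range i).map ((fun k => (i - k * m').choose k) ∘ (· + 1)), x = 0 := by
    intro x hx
    obtain ⟨k, _, rfl⟩ := List.mem_map.mp hx
    exact choose_term_zero m' i (k + 1) (by
      have : m' + 1 ≤ (k + 1) * (m' + 1) := Nat.le_mul_of_pos_left _ (by omega)
      omega)
  rw [List.sum_eq_zero hz]
  simp

lemma TT_at (m' : Nat) : TT m' (m' + 1) = 2 := by
  unfold TT
  rw [List.range_succ_eq_map, List.range_succ_eq_map]
  simp only [List.map_cons, List.map_map, List.sum_cons]
  have hz : ∀ x ∈ (List.range m').map ((fun k => (m' + 1 - k * m').choose k) ∘ (· + 1) ∘ (· + 1)), x = 0 := by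
    intro x hx
    obtain ⟨k, _, rfl⟩ := List.mem_map.mp hx
    exact choose_term_zero m' (m' + 1) (k + 2) (by
      have : 2 * (m' + 1) ≤ (k + 2) * (m' + 1) := Nat.mul_le_mul_right _ (by omega)
      omega)
  rw [List.sum_eq_zero hz]
  simp [Nat.succ_sub (Nat.le_refl m')]

lemma sum_map_add (l : List Nat) (f g : Nat → Nat) :
    (l.map (fun x => f x + g x)).sum = (l.map f).sum + (l.map g).sum := by
  induction l with
  | nil => rfl
  | cons x xs ih => simp [ih]; omega

lemma TT_peel (m' i : Nat) :
    TT m' i = 1 + ((List.range i).map (fun k => (i - (k + 1) * m').choose (k + 1))).sum := by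
  unfold TT
  rw [List.range_succ_eq_map]
  simp [List.map_map, Function.comp_def, Nat.succ_eq_add_one]

lemma TT_rec (m' j : Nat) : TT m' (j + m' + 2) = TT m' (j + m' + 1) + TT m' (j + 1) := by
  have hsplit : ∀ k ∈ List.range (j + m' + 2),
      (fun k => (j + m' + 2 - (k + 1) * m').choose (k + 1)) k
      = (fun k => (j + 1 - k * m').choose k + (j + m' + 1 - (k + 1) * m').choose (k + 1)) k := by
    intro k _
    simp only
    have hmul : (k + 1) * m' = k * m' + m' := Nat.succ_mul k m'
    by_cases hQ : (k + 1) * m' ≤ j + m' + 1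
    · have h1 : j + m' + 2 - (k + 1) * m' = (j + m' + 1 - (k + 1) * m') + 1 := by omega
      have h2 : j + 1 - k * m' = j + m' + 1 - (k + 1) * m' := by omega
      rw [h1, h2, Nat.choose_succ_succ]
    · rcases k with _ | k
      · exact absurd (by omega) hQ
      · have hmul2 : (k + 2) * m' = (k + 1) * m' + m' := Nat.succ_mul (k + 1) m'
        have h1 : j + m' + 2 - (k + 2) * m' = 0 := by omega
        have h2 : j + m' + 1 - (k + 2) * m' = 0 := by omega
        have h3 : j + 1 - (k + 1) * m' = 0 := by omega
        rw [h1, h2, h3]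
        simp [Nat.choose_zero_succ]
  have eg : ((List.range (j + m' + 2)).map (fun k => (j + 1 - k * m').choose k)).sum
      = TT m' (j + 1) := by
    have hsp : j + m' + 2 = (j + 2) + m' := by omega
    rw [hsp, List.range_add, List.map_append, List.sum_append, List.map_map]
    have hz : ((List.range m').map ((fun k => (j + 1 - k * m').choose k) ∘ (j + 2 + ·))).sum = 0 := by
      apply List.sum_eq_zero
      intro x hx
      obtain ⟨t, _, rfl⟩ := List.mem_map.mp hx
      simp only [Function.comp_apply]
      exact Nat.choose_eq_zero_of_lt (lt_of_le_of_lt (Nat.sub_le _ _) (by omega))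
    rw [hz, Nat.add_zero]
    rfl
  have eh : TT m' (j + m' + 1)
      = 1 + ((List.range (j + m' + 2)).map (fun k => (j + m' + 1 - (k + 1) * m').choose (k + 1))).sum := by
    have e2 : List.range (j + m' + 2) = List.range (j + m' + 1) ++ [j + m' + 1] := List.range_succ
    have hlast : (j + m' + 1 - ((j + m' + 1) + 1) * m').choose ((j + m' + 1) + 1) = 0 :=
      Nat.choose_eq_zero_of_lt (lt_of_le_of_lt (Nat.sub_le _ _) (by omega))
    rw [e2, List.map_append, List.sum_append, TT_peel]
    simp [hlast]
  rw [TT_peel m' (j + m' + 2), List.map_congr_left hsplit, sum_map_add, eg, eh]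
  omega

lemma TT_eq_F (m' i : Nat) : TT m' i = F m' i := by
  induction i using Nat.strong_induction_on with
  | _ i ih =>
    rw [F]
    by_cases h1 : i < m' + 1
    · rw [dif_pos h1]; exact TT_lt m' i h1
    · rw [dif_neg h1]
      by_cases h2 : i = m' + 1
      · rw [dif_pos h2, h2]; exact TT_at m'
      · rw [dif_neg h2]
        rw [← ih (i - 1) (by omega), ← ih (i - (m' + 1)) (by omega)]
        have ha : i - 1 = (i - m' - 2) + m' + 1 := by omega
        have hb : i - (m' + 1) = (i - m' - 2) + 1 := by omega
        have hc : i = (i - m' - 2) + m' + 2 := by omega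
        rw [ha, hb]
        calc TT m' i = TT m' ((i - m' - 2) + m' + 2) := by rw [← hc]
          _ = _ := TT_rec m' (i - m' - 2)

lemma F_lt (m' i : Nat) (h : i < m' + 1) : F m' i = 1 := by rw [F, dif_pos h]

lemma F_at (m' : Nat) : F m' (m' + 1) = 2 := by
  rw [F, dif_neg (by omega), dif_pos rfl]

lemma F_gt (m' i : Nat) (h : m' + 1 < i) :
    F m' i = F m' (i - 1) + F m' (i - (m' + 1)) := by
  rw [F, dif_neg (by omega), dif_neg (by omega)]

lemma set_map_range (Nn j : Nat) (g : Nat → Int) (v : Int) :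
    ((List.range Nn).map g).set j v = (List.range Nn).map (fun i => if i = j then v else g i) := by
  apply List.ext_getElem
  · simp
  · intro t h1 h2
    simp only [List.getElem_set, List.getElem_map, List.getElem_range]
    by_cases h : t = j
    · simp [h]
    · simp [h, Ne.symm h]

lemma getD_map_range' (Nn x : Nat) (g : Nat → Int) (h : x < Nn) :
    PySem.List.pyGetD ((List.range Nn).map g) (x : Int) 0 = g x := by
  rw [PySem.List.pyGetD_natCast]
  simp [List.getD_eq_getElem?_getD, h]

lemma loopA_inv (m' N : Nat) : ∀ t, t ≤ N →
    (PySem.List.pyRange 1 ((t : Int) + 1) 1).foldl (fun dp i =>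
      if i < (m' : Int) + 1 then PySem.List.pySetD dp i 1
      else if i = (m' : Int) + 1 then PySem.List.pySetD dp i 2
      else PySem.List.pySetD dp i
        (PySem.List.pyGetD dp (i - 1) 0 + PySem.List.pyGetD dp (i - ((m' : Int) + 1)) 0))
      ((List.range (N + 1)).map (fun _ => (0 : Int)))
    = (List.range (N + 1)).map (fun i => if 1 ≤ i ∧ i ≤ t then (F m' i : Int) else 0) := by
  intro t
  induction t with
  | zero =>
    intro _
    rw [PySem.List.pyRange_one_eq_nil (by omega)]
    apply List.map_congr_left
    intro x _
    beta_reduce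
    rw [if_neg (by omega)]
  | succ t ih =>
    intro ht
    have hcast : ((t + 1 : Nat) : Int) + 1 = ((t : Int) + 1) + 1 := by push_cast; ring
    rw [hcast, PySem.List.pyRange_one_succ_right (by omega), List.foldl_append, ih (by omega)]
    simp only [List.foldl_cons, List.foldl_nil]
    have hidx : (t : Int) + 1 = ((t + 1 : Nat) : Int) := by push_cast; ring
    by_cases c1 : t + 1 < m' + 1
    · rw [if_pos (by omega)]
      rw [hidx, PySem.List.pySetD_natCast, set_map_range]
      apply List.map_congr_left
      intro x hx
      beta_reduce
      by_cases hxe : x = t + 1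
      · rw [if_pos hxe, if_pos (by omega), hxe, F_lt m' (t + 1) c1]
        norm_num
      · rw [if_neg hxe]
        by_cases hb : 1 ≤ x ∧ x ≤ t
        · rw [if_pos hb, if_pos (by omega)]
        · rw [if_neg hb, if_neg (by omega)]
    · by_cases c2 : t + 1 = m' + 1
      · rw [if_neg (by omega), if_pos (by omega)]
        rw [hidx, PySem.List.pySetD_natCast, set_map_range]
        apply List.map_congr_left
        intro x hx
        beta_reduce
        by_cases hxe : x = t + 1
        · rw [if_pos hxe, if_pos (by omega), hxe, c2, F_at]
          norm_num
        · rw [if_neg hxe]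
          by_cases hb : 1 ≤ x ∧ x ≤ t
          · rw [if_pos hb, if_pos (by omega)]
          · rw [if_neg hb, if_neg (by omega)]
      · -- recurrence case: t + 1 > m' + 1
        have hgt : m' + 1 < t + 1 := by omega
        rw [if_neg (by omega), if_neg (by omega)]
        have e1 : (t : Int) + 1 - 1 = ((t : Nat) : Int) := by ring
        have e2 : (t : Int) + 1 - ((m' : Int) + 1) = ((t - m' : Nat) : Int) := by omega
        rw [e1, e2, getD_map_range' _ _ _ (by omega), getD_map_range' _ _ _ (by omega)]
        rw [if_pos (by omega), if_pos (by omega)]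
        rw [hidx, PySem.List.pySetD_natCast, set_map_range]
        apply List.map_congr_left
        intro x hx
        beta_reduce
        by_cases hxe : x = t + 1
        · rw [if_pos hxe, if_pos (by omega), hxe]
          rw [F_gt m' (t + 1) hgt]
          have : t + 1 - 1 = t := by omega
          rw [this, show t + 1 - (m' + 1) = t - m' by omega]
          push_cast; ring
        · rw [if_neg hxe]
          by_cases hb : 1 ≤ x ∧ x ≤ t
          · rw [if_pos hb, if_pos (by omega)]
          · rw [if_neg hb, if_neg (by omega)]

lemma A_eq_F (m' N : Nat) (hN : 1 ≤ N) :
    No_of_ways (N : Int) ((m' : Int) + 1) = (F m' N : Int) := by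
  unfold No_of_ways
  dsimp only
  have hdp0 : (PySem.List.pyRange 0 ((N : Int) + 1) 1).map (fun _ => (0 : Int))
      = (List.range (N + 1)).map (fun _ => (0 : Int)) := by
    rw [PySem.List.pyRange_one, show (((N : Int) + 1) - 0).toNat = N + 1 by omega, List.map_map]
    rfl
  rw [hdp0, loopA_inv m' N N (le_refl N), getD_map_range' _ _ _ (by omega)]
  rw [if_pos (by omega)]

lemma descFact_mul (x : Nat) : ∀ s, s ≤ x → Nat.descFactorial x s * (x - s).factorial = x.factorial := by
  intro s
  induction s with
  | zero => intro _; simp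
  | succ s ih =>
    intro h
    have hx : (x - s).factorial = (x - s) * (x - (s + 1)).factorial := by
      rw [show x - s = (x - (s + 1)) + 1 by omega, Nat.factorial_succ]
    calc Nat.descFactorial x (s + 1) * (x - (s + 1)).factorial
        = Nat.descFactorial x s * ((x - s) * (x - (s + 1)).factorial) := by
          rw [Nat.descFactorial_succ]; ring
      _ = Nat.descFactorial x s * (x - s).factorial := by rw [← hx]
      _ = x.factorial := ih (by omega)

-- exact ratio between consecutive binomial terms of the closed form
lemma ident (m' t A : Nat) (h : t + (m' + 1) ≤ A) :
    A.choose t * Nat.descFactorial (A - t) (m' + 1)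
      = (A - m').choose (t + 1) * ((t + 1) * Nat.descFactorial A m') := by
  have hpos : 0 < t.factorial * (A - (m' + 1) - t).factorial :=
    Nat.mul_pos t.factorial_pos (Nat.factorial_pos _)
  apply Nat.eq_of_mul_eq_mul_right hpos
  have e1 : A.choose t * Nat.descFactorial (A - t) (m' + 1)
        * (t.factorial * (A - (m' + 1) - t).factorial) = A.factorial := by
    have hd : Nat.descFactorial (A - t) (m' + 1) * ((A - t) - (m' + 1)).factorial
        = (A - t).factorial := descFact_mul (A - t) (m' + 1) (by omega)
    rw [show A - (m' + 1) - t = (A - t) - (m' + 1) by omega]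
    calc A.choose t * Nat.descFactorial (A - t) (m' + 1)
          * (t.factorial * ((A - t) - (m' + 1)).factorial)
        = A.choose t * t.factorial
          * (Nat.descFactorial (A - t) (m' + 1) * ((A - t) - (m' + 1)).factorial) := by ring
      _ = A.choose t * t.factorial * (A - t).factorial := by rw [hd]
      _ = A.factorial := Nat.choose_mul_factorial_mul_factorial (by omega)
  have e2 : (A - m').choose (t + 1) * ((t + 1) * Nat.descFactorial A m')
        * (t.factorial * (A - (m' + 1) - t).factorial) = A.factorial := by
    have hd : Nat.descFactorial A m' * (A - m').factorial = A.factorial :=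
      descFact_mul A m' (by omega)
    have hcf : (A - m').choose (t + 1) * (t + 1).factorial * ((A - m') - (t + 1)).factorial
        = (A - m').factorial := Nat.choose_mul_factorial_mul_factorial (by omega)
    calc (A - m').choose (t + 1) * ((t + 1) * Nat.descFactorial A m')
          * (t.factorial * (A - (m' + 1) - t).factorial)
        = (A - m').choose (t + 1) * ((t + 1) * t.factorial) * (A - (m' + 1) - t).factorial
          * Nat.descFactorial A m' := by ring
      _ = (A - m').choose (t + 1) * (t + 1).factorial * ((A - m') - (t + 1)).factorial
          * Nat.descFactorial A m' := by
          rw [← Nat.factorial_succ, show A - (m' + 1) - t = (A - m') - (t + 1) by omega]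
      _ = (A - m').factorial * Nat.descFactorial A m' := by rw [hcf]
      _ = A.factorial := by rw [mul_comm, hd]
  rw [e1, e2]

-- a product fold over range(s) of descending factors is a descending factorial
lemma prod_fold (x : Nat) : ∀ (s : Nat) (c : Int), s ≤ x →
    (PySem.List.pyRange 0 (s : Int) 1).foldl (fun p j => p * ((x : Int) - j)) c
    = c * (Nat.descFactorial x s : Int) := by
  intro s
  induction s with
  | zero =>
    intro c _
    rw [PySem.List.pyRange_one_eq_nil (by omega)]
    simp
  | succ s ih =>
    intro c h
    have hc : ((s + 1 : Nat) : Int) = (s : Int) + 1 := by push_cast; ring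
    rw [hc, PySem.List.pyRange_one_succ_right (by omega), List.foldl_append, ih c (by omega)]
    simp only [List.foldl_cons, List.foldl_nil]
    rw [Nat.descFactorial_succ, show (x : Int) - (s : Int) = ((x - s : Nat) : Int) by omega]
    push_cast
    ring

lemma B_inv (m' N : Nat) : ∀ t, t ≤ N / (m' + 1) →
    (PySem.List.pyRange 0 (t : Int) 1).foldl (fun (s : Int × Int) k =>
      (s.1 + PySem.Int.floordiv (s.2 * ((PySem.List.pyRange 0 ((m' : Int) + 1) 1).foldl
            (fun num j => num * ((N : Int) - k * ((m' : Int) + 1 - 1) - k - j)) 1))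
          ((PySem.List.pyRange 0 ((m' : Int) + 1 - 1) 1).foldl
            (fun den j => den * ((N : Int) - k * ((m' : Int) + 1 - 1) - j)) (k + 1)),
       PySem.Int.floordiv (s.2 * ((PySem.List.pyRange 0 ((m' : Int) + 1) 1).foldl
            (fun num j => num * ((N : Int) - k * ((m' : Int) + 1 - 1) - k - j)) 1))
          ((PySem.List.pyRange 0 ((m' : Int) + 1 - 1) 1).foldl
            (fun den j => den * ((N : Int) - k * ((m' : Int) + 1 - 1) - j)) (k + 1))))
      (1, 1)
    = (((((List.range (t + 1)).map (fun k => (N - k * m').choose k)).sum : Nat) : Int),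
       (((N - t * m').choose t : Nat) : Int)) := by
  intro t
  induction t with
  | zero =>
    intro _
    rw [PySem.List.pyRange_one_eq_nil (a := 0) (b := ((0 : Nat) : Int)) (by omega)]
    simp
  | succ t ih =>
    intro ht
    have hMle : (t + 1) * (m' + 1) ≤ N := (Nat.le_div_iff_mul_le (by omega)).mp ht
    have hexp : (t + 1) * (m' + 1) = t * m' + t + m' + 1 := by ring
    have htm : t * m' + t + m' + 1 ≤ N := by omega
    have hc : ((t + 1 : Nat) : Int) = (t : Int) + 1 := by push_cast; ring
    rw [hc, PySem.List.pyRange_one_succ_right (a := 0) (b := (t : Int)) (by omega),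
        List.foldl_append, ih (by omega)]
    simp only [List.foldl_cons, List.foldl_nil]
    have hcast : ((t * m' : Nat) : Int) = (t : Int) * (m' : Int) := by push_cast; ring
    simp only [show ((m' : Int) + 1 - 1) = (m' : Int) by ring]
    simp only [show ((m' : Int) + 1) = ((m' + 1 : Nat) : Int) by push_cast; ring]
    simp only [show (N : Int) - (t : Int) * (m' : Int) = ((N - t * m' : Nat) : Int) by omega]
    simp only [show ((N - t * m' : Nat) : Int) - (t : Int) = ((N - t * m' - t : Nat) : Int) by omega]
    rw [prod_fold (N - t * m' - t) (m' + 1) 1 (by omega),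
        prod_fold (N - t * m') m' ((t : Int) + 1) (by omega)]
    simp only [one_mul]
    have hdpos : 0 < (t + 1) * Nat.descFactorial (N - t * m') m' :=
      Nat.mul_pos (by omega) (Nat.descFactorial_pos.mpr (by omega))
    have hterm : PySem.Int.floordiv
        ((((N - t * m').choose t : Nat) : Int) * ((Nat.descFactorial (N - t * m' - t) (m' + 1) : Nat) : Int))
        (((t : Int) + 1) * ((Nat.descFactorial (N - t * m') m' : Nat) : Int))
        = (((N - (t + 1) * m').choose (t + 1) : Nat) : Int) := by
      have hnum : (((N - t * m').choose t : Nat) : Int)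
            * ((Nat.descFactorial (N - t * m' - t) (m' + 1) : Nat) : Int)
          = (((N - t * m').choose t * Nat.descFactorial (N - t * m' - t) (m' + 1) : Nat) : Int) := by
        push_cast; ring
      have hden : ((t : Int) + 1) * ((Nat.descFactorial (N - t * m') m' : Nat) : Int)
          = (((t + 1) * Nat.descFactorial (N - t * m') m' : Nat) : Int) := by
        push_cast; ring
      rw [hnum, hden, ident m' t (N - t * m') (by omega),
          show (N - t * m') - m' = N - (t + 1) * m' by
            have hx : (t + 1) * m' = t * m' + m' := by ring
            omega,
          PySem.Int.floordiv_natCast, Nat.mul_div_cancel _ hdpos]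
    rw [hterm, Prod.mk.injEq]
    constructor
    · rw [show List.range (t + 1 + 1) = List.range (t + 1) ++ [t + 1] from List.range_succ,
          List.map_append, List.sum_append, Nat.cast_add]
      simp
    · rfl

lemma sum_trunc (m' N : Nat) :
    ((List.range (N / (m' + 1) + 1)).map (fun k => (N - k * m').choose k)).sum = TT m' N := by
  have hsp : N + 1 = (N / (m' + 1) + 1) + (N + 1 - (N / (m' + 1) + 1)) := by
    have := Nat.div_le_self N (m' + 1); omega
  have e : List.range (N + 1)
      = List.range (N / (m' + 1) + 1)
        ++ (List.range (N + 1 - (N / (m' + 1) + 1))).map (N / (m' + 1) + 1 + ·) :=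
    calc List.range (N + 1)
        = List.range ((N / (m' + 1) + 1) + (N + 1 - (N / (m' + 1) + 1))) := by rw [← hsp]
      _ = _ := List.range_add
  have hz : ((List.range (N + 1 - (N / (m' + 1) + 1))).map
      ((fun k => (N - k * m').choose k) ∘ (N / (m' + 1) + 1 + ·))).sum = 0 := by
    apply List.sum_eq_zero
    intro x hx
    obtain ⟨tt, _, rfl⟩ := List.mem_map.mp hx
    simp only [Function.comp_apply]
    apply choose_term_zero
    have hlt : N / (m' + 1) < N / (m' + 1) + 1 + tt := by omega
    exact (Nat.div_lt_iff_lt_mul (by omega)).mp hlt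
  unfold TT
  rw [e, List.map_append, List.sum_append, List.map_map, hz, Nat.add_zero]
  omega

lemma B_eq_TT (m' N : Nat) :
    No_of_ways_alt (N : Int) ((m' : Int) + 1) = (TT m' N : Int) := by
  unfold No_of_ways_alt
  dsimp only
  have hq : PySem.Int.floordiv (N : Int) ((m' : Int) + 1) = ((N / (m' + 1) : Nat) : Int) := by
    rw [show ((m' : Int) + 1) = ((m' + 1 : Nat) : Int) by push_cast; ring,
        PySem.Int.floordiv_natCast]
  rw [hq, B_inv m' N (N / (m' + 1)) (le_refl _)]
  exact congrArg _ (sum_trunc m' N)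

lemma A_zero (m : Int) : No_of_ways 0 m = 0 := by
  unfold No_of_ways
  dsimp only
  rw [PySem.List.pyRange_one_eq_nil (show (0 : Int) + 1 ≤ 1 by norm_num)]
  simp only [List.foldl_nil]
  rw [PySem.List.pyRange_one, show (((0 : Int) + 1) - 0).toNat = 1 by norm_num]
  simp [PySem.List.pyGetD_zero_cons]

lemma B_zero (m : Int) (hm : 1 ≤ m) : No_of_ways_alt 0 m = 1 := by
  unfold No_of_ways_alt
  dsimp only
  rw [show PySem.Int.floordiv 0 m = 0 by
    rw [PySem.Int.floordiv_eq_ediv_of_pos (by omega)]; simp]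
  rw [PySem.List.pyRange_one_eq_nil (a := 0) (b := 0) (by omega)]
  simp

-- ===== VERDICT (by name: the statement is the Claim_ definition above) =====
theorem No_of_ways_spec : Claim_unchanged_No_of_ways := by
  intro n m _ hpre hD
  obtain ⟨hn, hm⟩ := hpre
  unfold D_No_of_ways at hD
  have hN : n = ((n.toNat : Nat) : Int) := by omega
  have hM : m = ((m.toNat - 1 : Nat) : Int) + 1 := by omega
  rw [hN, hM, A_eq_F _ _ (by omega), B_eq_TT, TT_eq_F]

theorem No_of_ways_changed : Claim_changed_No_of_ways := by
  unfold Claim_changed_No_of_ways; decide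

theorem No_of_ways_tight : Claim_exact_No_of_ways := by
  intro n m _ hpre hD
  unfold D_No_of_ways at hD
  subst hD
  rw [A_zero, B_zero m hpre.2]
  decide
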